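-- pv_equiv track=rewrite | github.com/mantuonweb/Generative_AgenticApp | agents/search_agent.py | _find_direct_matches
-- ===== SOURCE A (Python) =====
-- def _find_direct_matches(required_skills, candidate_skills):
--     """Find direct string matches (case-insensitive) - STRICT"""
--     candidate_skills_lower = [skill.lower().strip() for skill in candidate_skills]
--     direct_matches = []
--
--     for req_skill in required_skills:
--         req_lower = req_skill.lower().strip()
--
--         for cand_skill in candidate_skills_lower:
--             # Exact match
--             if req_lower == cand_skill:
--                 direct_matches.append(req_skill)
--                 break
--             # Required skill is contained in candidate skill
--             elif req_lower in cand_skill and len(req_lower) > 3: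
--                 # Prevent "java" matching "javascript"
--                 if req_lower == "java" and cand_skill == "javascript":
--                     continue
--                 direct_matches.append(req_skill)
--                 break
--
--     return direct_matches
-- ===== SOURCE B (Python) =====
-- def _matches(r, c):
--     """Does normalized required skill r match normalized candidate skill c?"""
--     return r == c or (len(r) > 3 and r in c and not (r == "java" and c == "javascript"))
--
-- def _find_direct_matches(required_skills, candidate_skills):
--     """Find direct string matches (case-insensitive) - STRICT.
--     Transposed: sweep the candidates once, marking required skills in a
--     boolean vector; finally emit the marked required skills in order."""
--     norm = [s.lower().strip() for s in required_skills]
--     matched = [False] * len(required_skills)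
--     for cand in candidate_skills:
--         c = cand.lower().strip()
--         matched = [m or _matches(r, c) for r, m in zip(norm, matched)]
--     return [s for s, m in zip(required_skills, matched) if m]
-- ===== Notes on version B (the rewrite author's own statement) =====
-- stated objective: alternative
-- what changed: Transposes the nested loops: instead of A's required-major scan with an inner break/continue loop over candidates, B sweeps the candidates once in the outer loop, marking each required skill in a boolean matched vector, and finally emits the marked required skills in their original order.
import Mathlib
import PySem

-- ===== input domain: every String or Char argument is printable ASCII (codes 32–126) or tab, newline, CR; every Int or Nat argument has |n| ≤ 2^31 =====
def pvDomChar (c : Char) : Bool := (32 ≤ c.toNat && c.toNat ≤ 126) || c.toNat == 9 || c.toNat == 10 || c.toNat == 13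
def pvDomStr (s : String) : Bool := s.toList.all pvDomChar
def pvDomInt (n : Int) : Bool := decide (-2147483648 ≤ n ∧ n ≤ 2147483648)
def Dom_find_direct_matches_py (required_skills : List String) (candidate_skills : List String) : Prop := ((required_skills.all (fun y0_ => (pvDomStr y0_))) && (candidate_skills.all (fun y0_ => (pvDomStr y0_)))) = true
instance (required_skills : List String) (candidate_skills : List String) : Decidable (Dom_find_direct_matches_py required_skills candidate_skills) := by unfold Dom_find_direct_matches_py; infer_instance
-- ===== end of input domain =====

-- B transposes A's nested loops: outer loop over candidates marking a boolean matched
-- vector over required skills, then one final pass emitting the marked skills (objective: alternative).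


-- ===== PORT A =====
-- normalization skill.lower().strip(), shared spelling of both ports' source
def pvNorm (s : String) : String := PySem.Str.strip (PySem.Str.lower s)

-- A's inner 'for cand_skill in candidate_skills_lower' loop with break/continue
def pvInnerA (req_skill req_lower : String) (cl : List String) (acc : List String) : List String :=
  match cl with
  | [] => acc
  | c :: rest =>
    if req_lower == c then acc ++ [req_skill]
    else if PySem.Str.isIn req_lower c && decide (3 < PySem.Str.len req_lower) then
      if req_lower == "java" && c == "javascript" then pvInnerA req_skill req_lower rest acc
      else acc ++ [req_skill]
    else pvInnerA req_skill req_lower rest acc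

def find_direct_matches_py (required_skills : List String) (candidate_skills : List String) : List String :=
  let candidate_skills_lower := candidate_skills.map pvNorm
  required_skills.foldl
    (fun direct_matches req_skill =>
      pvInnerA req_skill (pvNorm req_skill) candidate_skills_lower direct_matches)
    []

-- ===== PORT B =====
-- Source B's _matches(r, c)
def pvMatches (r c : String) : Bool :=
  r == c || (decide (3 < PySem.Str.len r) && PySem.Str.isIn r c && !(r == "java" && c == "javascript"))

def find_direct_matches_py_alt (required_skills : List String) (candidate_skills : List String) : List String :=
  let norm := required_skills.map pvNorm
  let matched :=
    candidate_skills.foldl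
      (fun m cand =>
        let c := pvNorm cand
        (norm.zip m).map (fun p => p.2 || pvMatches p.1 c))
      (List.replicate required_skills.length false)
  ((required_skills.zip matched).filter (fun p => p.2)).map (fun p => p.1)

-- ===== PRECONDITION & SPEC =====
def Spec_find_direct_matches_py (required_skills : List String) (candidate_skills : List String) (out : List String) : Prop := out = find_direct_matches_py_alt required_skills candidate_skills
instance (required_skills : List String) (candidate_skills : List String) (out : List String) : Decidable (Spec_find_direct_matches_py required_skills candidate_skills out) := by unfold Spec_find_direct_matches_py; infer_instance

-- ===== CLAIM (what is proved, stated in full; the proofs are below) =====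
def Claim_equal_find_direct_matches_py : Prop := ∀ (required_skills : List String) (candidate_skills : List String), Dom_find_direct_matches_py required_skills candidate_skills → Spec_find_direct_matches_py required_skills candidate_skills (find_direct_matches_py required_skills candidate_skills)

-- ===== LEMMAS AND PROOFS =====

-- A's inner loop appends req_skill exactly when some candidate satisfies A's per-candidate condition
lemma pvInnerA_eq_if (req_skill req_lower : String) (cl : List String) (acc : List String) :
    pvInnerA req_skill req_lower cl acc =
      (if cl.any (fun c => req_lower == c ||
          (PySem.Str.isIn req_lower c && decide (3 < PySem.Str.len req_lower) &&
            !(req_lower == "java" && c == "javascript")))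
       then acc ++ [req_skill] else acc) := by
  induction cl with
  | nil => simp [pvInnerA]
  | cons c rest ih =>
    simp only [pvInnerA, List.any_cons]
    by_cases h1 : (req_lower == c) = true
    · simp only [h1, Bool.true_or, if_true]
    · rw [Bool.not_eq_true] at h1
      by_cases h2 : (PySem.Str.isIn req_lower c && decide (3 < PySem.Str.len req_lower)) = true
      · by_cases h3 : (req_lower == "java" && c == "javascript") = true
        · simp only [h1, h2, h3, Bool.not_true, Bool.and_false, Bool.false_or, Bool.false_eq_true, if_false, if_true, ih]
        · rw [Bool.not_eq_true] at h3
          simp only [h1, h2, h3, Bool.not_false, Bool.and_true, Bool.true_or, Bool.false_or,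
            Bool.false_eq_true, if_false, if_true]
      · rw [Bool.not_eq_true] at h2
        simp only [h1, h2, Bool.false_and, Bool.false_or, Bool.false_eq_true, if_false, ih]

-- A's per-candidate condition is B's pvMatches (conjunction commuted)
lemma pvCondA_eq_matches (r c : String) :
    (r == c || (PySem.Str.isIn r c && decide (3 < PySem.Str.len r) && !(r == "java" && c == "javascript")))
      = pvMatches r c := by
  unfold pvMatches
  rw [Bool.and_comm (PySem.Str.isIn r c) (decide (3 < PySem.Str.len r))]

-- the folded A-loop is a filter over required skills of the existence condition
lemma pv_mainA (req : List String) (cl : List String) (acc : List String) :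
    req.foldl (fun dm rs => pvInnerA rs (pvNorm rs) cl dm) acc =
      acc ++ req.filter (fun rs => cl.any (fun c => pvMatches (pvNorm rs) c)) := by
  induction req generalizing acc with
  | nil => simp only [List.foldl_nil, List.filter_nil, List.append_nil]
  | cons rs rest ih =>
    simp only [List.foldl_cons, List.filter_cons]
    rw [pvInnerA_eq_if]
    rw [show (fun c => pvNorm rs == c ||
        (PySem.Str.isIn (pvNorm rs) c && decide (3 < PySem.Str.len (pvNorm rs)) &&
          !(pvNorm rs == "java" && c == "javascript")))
        = (fun c => pvMatches (pvNorm rs) c) from funext fun c => pvCondA_eq_matches _ _]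
    by_cases h : (cl.any (fun c => pvMatches (pvNorm rs) c)) = true
    · simp only [h, if_true, ih, List.append_assoc, List.singleton_append]
    · rw [Bool.not_eq_true] at h
      simp only [h, Bool.false_eq_true, if_false, ih]

-- B's comprehension over zip is zipWith
lemma pv_zipmap {α β γ : Type} (f : α → β → γ) (xs : List α) (ys : List β) :
    (xs.zip ys).map (fun p => f p.1 p.2) = List.zipWith f xs ys := by
  induction xs generalizing ys with
  | nil => simp
  | cons x xs ih => cases ys <;> simp [ih]

-- zipWith composition along the same left list
lemma pv_zipWith_comp {α β γ δ : Type} (f : α → β → γ) (g : α → γ → δ) (xs : List α) (ys : List β) :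
    List.zipWith g xs (List.zipWith f xs ys) = List.zipWith (fun a b => g a (f a b)) xs ys := by
  induction xs generalizing ys with
  | nil => simp
  | cons x xs ih => cases ys <;> simp [ih]

lemma pv_zipWith_congr {α β γ : Type} (f g : α → β → γ) (xs : List α) (ys : List β)
    (h : ∀ a b, f a b = g a b) : List.zipWith f xs ys = List.zipWith g xs ys := by
  induction xs generalizing ys with
  | nil => simp
  | cons x xs ih => cases ys <;> simp [ih] <;> exact h _ _

-- zipWith projecting the second list is the identity at matching lengths
lemma pv_zipWith_snd {α : Type} (xs : List α) (m : List Bool) (h : m.length = xs.length) :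
    List.zipWith (fun _ b => b) xs m = m := by
  induction xs generalizing m with
  | nil => cases m with
    | nil => rfl
    | cons b bs => simp at h
  | cons x xs ih => cases m with
    | nil => simp at h
    | cons b bs => simp only [List.zipWith_cons_cons]; rw [ih]; simpa using h

-- B's candidate fold computes, pointwise, the existence test over all candidates
lemma pv_fold_matched (norm cs : List String) (m : List Bool) (h : m.length = norm.length) :
    cs.foldl (fun m cand => (norm.zip m).map (fun p => p.2 || pvMatches p.1 (pvNorm cand))) m =
      List.zipWith (fun r b => b || cs.any (fun cand => pvMatches r (pvNorm cand))) norm m := by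
  induction cs generalizing m with
  | nil =>
    simp only [List.foldl_nil, List.any_nil, Bool.or_false]
    exact (pv_zipWith_snd norm m h).symm
  | cons c rest ih =>
    rw [List.foldl_cons,
      show (norm.zip m).map (fun p => p.2 || pvMatches p.1 (pvNorm c))
          = List.zipWith (fun r b => b || pvMatches r (pvNorm c)) norm m from pv_zipmap (fun r b => b || pvMatches r (pvNorm c)) norm m,
      ih (List.zipWith (fun r b => b || pvMatches r (pvNorm c)) norm m)
        (by simp [List.length_zipWith, h]),
      pv_zipWith_comp]
    apply pv_zipWith_congr
    intro a b
    simp [List.any_cons, Bool.or_assoc]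

-- filtering a zip of xs with a map over xs collapses to a plain filter
lemma pv_zip_filter {α : Type} (g : α → Bool) (xs : List α) :
    ((xs.zip (xs.map g)).filter (fun p => p.2)).map (fun p => p.1) = xs.filter g := by
  induction xs with
  | nil => simp
  | cons x xs ih =>
    simp only [List.map_cons, List.zip_cons_cons, List.filter_cons]
    cases h : g x <;> simp [h, ih]

-- zipWith over a replicate of false with matching length is a map
lemma pv_zipWith_replicate (f : String → Bool) (xs : List String) :
    List.zipWith (fun r b => b || f r) xs (List.replicate xs.length false) = xs.map f := by
  induction xs with
  | nil => simp
  | cons x xs ih => simp [List.replicate_succ, ih]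

-- ===== VERDICT (by name: the statement is the Claim_ definition above) =====
theorem find_direct_matches_py_spec : Claim_equal_find_direct_matches_py := by
  intro req cand _
  unfold Spec_find_direct_matches_py find_direct_matches_py find_direct_matches_py_alt
  simp only
  rw [pv_mainA, List.nil_append]
  rw [pv_fold_matched (req.map pvNorm) cand (List.replicate req.length false) (by simp)]
  rw [show req.length = (req.map pvNorm).length from (List.length_map ..).symm,
    pv_zipWith_replicate, List.map_map]
  rw [pv_zip_filter ((fun r => cand.any (fun cand => pvMatches r (pvNorm cand))) ∘ pvNorm) req]
  apply List.filter_congr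
  intro rs _
  simp only [List.any_map, Function.comp_def]
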